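-- pv_equiv track=rewrite | github.com/zuiyi233/miaowu-os | deer-flow-main/backend/app/gateway/novel_migrated/services/memory_service.py | _extract_chapter_number
-- ===== SOURCE A (Python) =====
-- def _extract_chapter_number(entity_id: str) -> int:
--     raw = (entity_id or "").strip()
--     digits = "".join(ch for ch in raw if ch.isdigit())
--     if not digits:
--         return 0
--     try:
--         return int(digits)
--     except ValueError:
--         return 0
-- ===== SOURCE B (Python) =====
-- def _extract_chapter_number(entity_id: str) -> int:
--     # Single arithmetic pass: fold each decimal digit into the accumulator.
--     # (stripping is unnecessary: whitespace is never a digit, so the filter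
--     # pass over the stripped string sees exactly the digits of the original)
--     value = 0
--     for ch in entity_id or "":
--         if "0" <= ch <= "9":
--             value = value * 10 + (ord(ch) - 48)
--     return value
-- ===== Notes on version B (the rewrite author's own statement) =====
-- stated objective: simpler
-- what changed: Replaces strip + join-of-filtered-chars + int() string parsing (which allocates an intermediate string and re-scans it) with a single arithmetic pass that folds each decimal digit directly into an integer accumulator; no strip, no intermediate string, no parser.
import Mathlib
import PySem

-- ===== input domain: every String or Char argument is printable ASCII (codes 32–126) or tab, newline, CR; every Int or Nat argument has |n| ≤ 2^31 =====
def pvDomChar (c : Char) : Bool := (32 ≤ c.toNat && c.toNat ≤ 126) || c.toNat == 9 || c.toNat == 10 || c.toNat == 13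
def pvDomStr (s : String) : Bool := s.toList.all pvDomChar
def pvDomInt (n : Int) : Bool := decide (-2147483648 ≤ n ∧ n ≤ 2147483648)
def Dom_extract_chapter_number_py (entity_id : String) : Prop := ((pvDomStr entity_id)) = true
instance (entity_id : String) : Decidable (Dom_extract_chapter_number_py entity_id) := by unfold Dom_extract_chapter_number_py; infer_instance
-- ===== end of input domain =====

-- B replaces strip + join-filtered-chars + int() parsing with one arithmetic digit-folding pass (simpler; same O(n) cost).
-- ===== PORT A =====
-- int(digits): hand-ported as decimal folding — exact at this call site, because `digits` is by
-- construction a nonempty list of chars passing isdigit, i.e. '0'..'9', on which int() is plain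
-- decimal conversion and the ValueError branch is unreachable.
def pvIntOfDigits (ds : List Char) : Int :=
  ds.foldl (fun a c => 10 * a + ((c.toNat : Int) - 48)) 0

def extract_chapter_number_py (entity_id : String) : Int :=
  let raw := PySem.Str.strip entity_id
  let digits := raw.toList.filter PySem.Chars.isdigit
  if digits = [] then 0
  else pvIntOfDigits digits

-- ===== PORT B =====
def extract_chapter_number_py_alt (entity_id : String) : Int :=
  entity_id.toList.foldl
    (fun v c => if '0' ≤ c ∧ c ≤ '9' then v * 10 + ((c.toNat : Int) - 48) else v) 0

-- ===== PRECONDITION & SPEC =====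
def Spec_extract_chapter_number_py (entity_id : String) (out : Int) : Prop := out = extract_chapter_number_py_alt entity_id
instance (entity_id : String) (out : Int) : Decidable (Spec_extract_chapter_number_py entity_id out) := by unfold Spec_extract_chapter_number_py; infer_instance

-- ===== CLAIM (what is proved, stated in full; the proofs are below) =====
def Claim_equal_extract_chapter_number_py : Prop := ∀ (entity_id : String), Dom_extract_chapter_number_py entity_id → Spec_extract_chapter_number_py entity_id (extract_chapter_number_py entity_id)

-- ===== LEMMAS AND PROOFS =====


theorem pv_filter_dropWhile {p q : Char → Bool} (h : ∀ x, q x = true → p x = false)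
    (l : List Char) : (l.dropWhile q).filter p = l.filter p := by
  induction l with
  | nil => rfl
  | cons c cs ih =>
    by_cases hq : q c = true
    · simp [hq, h c hq, ih]
    · simp [hq]

theorem pv_space_not_digit : ∀ x, PySem.Chars.isspace x = true → PySem.Chars.isdigit x = false := by
  intro x hx
  simp [PySem.Chars.isspace] at hx
  simp [PySem.Chars.isdigit, Char.le_def, UInt32.le_iff_toNat_le]
  have hlink : x.toNat = x.val.toNat := rfl
  rcases hx with ((((((((((hx|hx)|hx)|hx)|hx)|hx)|hx)|hx)|hx)|hx)|hx) <;> omega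

theorem pv_filter_strip (l : List Char) :
    (PySem.Chars.strip l).filter PySem.Chars.isdigit = l.filter PySem.Chars.isdigit := by
  unfold PySem.Chars.strip PySem.Chars.rstrip PySem.Chars.lstrip
  rw [List.filter_reverse, pv_filter_dropWhile pv_space_not_digit,
      List.filter_reverse, List.reverse_reverse, pv_filter_dropWhile pv_space_not_digit]


-- ===== VERDICT (by name: the statement is the Claim_ definition above) =====
theorem extract_chapter_number_py_spec : Claim_equal_extract_chapter_number_py := by
  intro s _
  unfold Spec_extract_chapter_number_py extract_chapter_number_py extract_chapter_number_py_alt pvIntOfDigits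
  rw [PySem.List.foldl_ite_eq_foldl_filter]
  have hpred : (fun c => decide ('0' ≤ c ∧ c ≤ '9')) = PySem.Chars.isdigit := by
    funext c; simp [PySem.Chars.isdigit]
  have hstrip : (PySem.Str.strip s).toList.filter PySem.Chars.isdigit
      = s.toList.filter PySem.Chars.isdigit := by
    rw [PySem.Str.toList_strip]; exact pv_filter_strip _
  have hf : (fun (a : Int) (c : Char) => 10 * a + ((c.toNat : Int) - 48))
      = fun (v : Int) (c : Char) => v * 10 + ((c.toNat : Int) - 48) := by
    funext a c; ring
  rw [hpred]
  simp only [hstrip, hf]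
  by_cases h : s.toList.filter PySem.Chars.isdigit = [] <;> simp [h]
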